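-- pv_equiv track=rewrite | github.com/mju-likelion/Nevermind-backend | nevermind/subscription/views.py | calc_subscription_bill
-- ===== SOURCE A (Python) =====
-- def calc_subscription_bill(sub_type, bill):
--   bill_types = {
--     'W': [ 'week_bill', { 'M': 4, 'Y': 52 } ],
--     'M': [ 'month_bill', { 'Y': 12 } ],
--     'Y': [ 'year_bill', {} ],
--   }
--   bills = {
--     'week_bill': 0,
--     'month_bill': 0,
--     'year_bill': 0,
--   }
--   if sub_type == 'L':
--     return bills
--   bills[bill_types[sub_type][0]] = bill
--   for k, v in bill_types[sub_type][1].items():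
--     bills[bill_types[k][0]] = bill * v
--   return bills
-- ===== SOURCE B (Python) =====
-- def calc_subscription_bill(sub_type, bill):
--   if sub_type == 'L':
--     w, m, y = 0, 0, 0
--   else:
--     w, m, y = {
--       'W': (bill, bill * 4, bill * 52),
--       'M': (0, bill, bill * 12),
--       'Y': (0, 0, bill),
--     }[sub_type]
--   return {'week_bill': w, 'month_bill': m, 'year_bill': y}
-- ===== Notes on version B (the rewrite author's own statement) =====
-- stated objective: simpler
-- what changed: Replaces the bill_types metadata table, dict mutation and multiplier loop with a direct sub_type -> (week, month, year) tuple lookup and a single dict literal built from it.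
import Mathlib
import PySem

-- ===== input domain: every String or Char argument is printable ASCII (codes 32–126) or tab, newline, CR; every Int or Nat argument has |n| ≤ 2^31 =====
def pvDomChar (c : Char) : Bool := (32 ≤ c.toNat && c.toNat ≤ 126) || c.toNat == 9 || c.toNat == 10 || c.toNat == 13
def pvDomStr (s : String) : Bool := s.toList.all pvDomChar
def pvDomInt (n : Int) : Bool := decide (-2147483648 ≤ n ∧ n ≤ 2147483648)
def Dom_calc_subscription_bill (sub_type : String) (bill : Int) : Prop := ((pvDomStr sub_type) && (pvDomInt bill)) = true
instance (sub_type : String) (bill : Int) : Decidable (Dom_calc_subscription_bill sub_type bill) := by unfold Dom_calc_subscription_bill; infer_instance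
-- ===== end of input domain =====

-- B replaces A's bill_types metadata table, dict mutation and multiplier loop
-- with a direct sub_type -> (week, month, year) lookup and one result literal (simpler).


-- ===== PORT A =====
-- bill_types[s]: some (column name, multiplier dict) for 'W'/'M'/'Y', none = KeyError (excluded by Pre_)
def pvBillTypesA (s : String) : Option (String × List (String × Int)) :=
  if s == "W" then some ("week_bill", [("M", 4), ("Y", 52)])
  else if s == "M" then some ("month_bill", [("Y", 12)])
  else if s == "Y" then some ("year_bill", [])
  else none

def calc_subscription_bill (sub_type : String) (bill : Int) : List (String × Int) :=
  let bills : PySem.Dict String Int := PySem.Dict.ofList [("week_bill", 0), ("month_bill", 0), ("year_bill", 0)]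
  if sub_type == "L" then bills.items
  else
    match pvBillTypesA sub_type with
    | none => bills.items   -- unreachable: Pre_ excludes the KeyError inputs
    | some (name, mults) =>
      let bills := PySem.Dict.insert bills name bill
      (mults.foldl (fun b kv =>
        match pvBillTypesA kv.1 with
        | some (n, _) => PySem.Dict.insert b n (bill * kv.2)
        | none => b) bills).items

-- ===== PORT B =====
def calc_subscription_bill_alt (sub_type : String) (bill : Int) : List (String × Int) :=
  let wmy : Int × Int × Int :=
    if sub_type == "L" then (0, 0, 0)
    else if sub_type == "W" then (bill, bill * 4, bill * 52)
    else if sub_type == "M" then (0, bill, bill * 12)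
    else (0, 0, bill)   -- 'Y'; other keys are KeyError in Source B, excluded by Pre_
  [("week_bill", wmy.1), ("month_bill", wmy.2.1), ("year_bill", wmy.2.2)]

-- ===== PRECONDITION & SPEC =====
-- Pre_ excludes exactly the sub_types outside {'L','W','M','Y'}, on which A (and B) raise KeyError.
def Pre_calc_subscription_bill (sub_type : String) (bill : Int) : Prop :=
  sub_type = "L" ∨ sub_type = "W" ∨ sub_type = "M" ∨ sub_type = "Y"
instance (sub_type : String) (bill : Int) : Decidable (Pre_calc_subscription_bill sub_type bill) := by unfold Pre_calc_subscription_bill; infer_instance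
def pvWitness_calc_subscription_bill : String × Int := ("W", 10)

def Spec_calc_subscription_bill (sub_type : String) (bill : Int) (out : List (String × Int)) : Prop := out = calc_subscription_bill_alt sub_type bill
instance (sub_type : String) (bill : Int) (out : List (String × Int)) : Decidable (Spec_calc_subscription_bill sub_type bill out) := by unfold Spec_calc_subscription_bill; infer_instance

-- ===== CLAIM (what is proved, stated in full; the proofs are below) =====
def Claim_equal_calc_subscription_bill : Prop := ∀ (sub_type : String) (bill : Int), Dom_calc_subscription_bill sub_type bill → Pre_calc_subscription_bill sub_type bill → Spec_calc_subscription_bill sub_type bill (calc_subscription_bill sub_type bill)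

-- ===== LEMMAS AND PROOFS =====

-- ===== VERDICT (by name: the statement is the Claim_ definition above) =====
theorem calc_subscription_bill_spec : Claim_equal_calc_subscription_bill := by
  intro sub_type bill _ hpre
  rcases hpre with h | h | h | h <;> subst h <;>
    simp [Spec_calc_subscription_bill, calc_subscription_bill, calc_subscription_bill_alt,
      pvBillTypesA, PySem.Dict.ofList, PySem.Dict.insert, PySem.Dict.items,
      PySem.Dict.update, PySem.Dict.empty, List.foldl]
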